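-- pv_equiv track=rewrite | github.com/dsardelic/AdventOfCode2020 | aoc2020/day_16_part_2.py | find_valid_tickets
-- ===== SOURCE A (Python) =====
-- import itertools
--
-- def find_valid_tickets(tickets, allowed_ranges_per_field):
--     all_allowed_ranges = list(
--         itertools.chain.from_iterable(allowed_ranges_per_field.values())
--     )
--
--     def is_valid(ticket):
--         return all(
--             any(value in allowed_range for allowed_range in all_allowed_ranges)
--             for value in ticket
--         )
--
--     return tuple(ticket for ticket in tickets if is_valid(ticket))
-- ===== SOURCE B (Python) =====
-- def find_valid_tickets(tickets, allowed_ranges_per_field):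
--     seen = set()
--     for ranges in allowed_ranges_per_field.values():
--         for r in ranges:
--             seen.update(r)
--     vals = sorted(seen)
--
--     def contains(v):
--         lo, hi = 0, len(vals)
--         while lo < hi:
--             mid = (lo + hi) // 2
--             if vals[mid] < v:
--                 lo = mid + 1
--             else:
--                 hi = mid
--         return lo < len(vals) and vals[lo] == v
--
--     return tuple(t for t in tickets if all(contains(v) for v in t))
-- ===== Notes on version B (the rewrite author's own statement) =====
-- stated objective: faster
-- what changed: B collects the distinct allowed values, sorts them once, and decides each ticket value's validity by binary search over that sorted array, instead of A's linear scan of every allowed range for every ticket value.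
import Mathlib
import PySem

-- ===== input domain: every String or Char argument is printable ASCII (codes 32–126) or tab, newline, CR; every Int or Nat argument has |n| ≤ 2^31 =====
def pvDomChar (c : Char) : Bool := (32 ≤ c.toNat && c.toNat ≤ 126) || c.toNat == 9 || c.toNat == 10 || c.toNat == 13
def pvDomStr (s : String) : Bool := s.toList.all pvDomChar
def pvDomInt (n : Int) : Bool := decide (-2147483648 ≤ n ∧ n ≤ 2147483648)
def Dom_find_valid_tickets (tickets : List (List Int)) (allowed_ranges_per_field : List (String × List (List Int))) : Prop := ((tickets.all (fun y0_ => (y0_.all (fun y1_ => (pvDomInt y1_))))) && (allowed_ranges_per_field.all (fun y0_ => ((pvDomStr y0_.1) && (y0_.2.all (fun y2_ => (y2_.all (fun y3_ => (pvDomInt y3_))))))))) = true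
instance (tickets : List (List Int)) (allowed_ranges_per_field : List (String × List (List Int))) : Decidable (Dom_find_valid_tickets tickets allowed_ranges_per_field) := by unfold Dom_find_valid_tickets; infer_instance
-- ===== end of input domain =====

-- B sorts the distinct allowed values once and decides each ticket value by binary
-- search over that sorted array, instead of A's linear scan of every allowed range
-- per value (objective: faster).

-- ===== PORT A =====
def find_valid_tickets (tickets : List (List Int)) (allowed_ranges_per_field : List (String × List (List Int))) : List (List Int) :=
  let all_allowed_ranges := (allowed_ranges_per_field.map Prod.snd).flatMap id
  let is_valid := fun (ticket : List Int) =>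
    ticket.all (fun value => all_allowed_ranges.any (fun allowed_range => allowed_range.contains value))
  tickets.filter is_valid

-- ===== PORT B =====
-- the while loop of Source B's `contains`, fuel = hi - lo at entry (≤ vals.length);
-- vals[mid] is PySem.List.pyGet? (in range on every reachable call, none-branch unreachable)
def pvBsLoop (vals : List Int) (v : Int) : Nat → Nat → Nat → Nat
  | 0, lo, _ => lo
  | fuel + 1, lo, hi =>
    if lo < hi then
      match PySem.List.pyGet? vals (((lo + hi) / 2 : Nat) : Int) with
      | some y => if y < v then pvBsLoop vals v fuel ((lo + hi) / 2 + 1) hi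
                  else pvBsLoop vals v fuel lo ((lo + hi) / 2)
      | none => lo
    else lo

def pvContains (vals : List Int) (v : Int) : Bool :=
  let lo := pvBsLoop vals v vals.length 0 vals.length
  decide (lo < vals.length) && (vals.getD lo 0 == v)

def find_valid_tickets_alt (tickets : List (List Int)) (allowed_ranges_per_field : List (String × List (List Int))) : List (List Int) :=
  let seen : PySem.Set Int :=
    allowed_ranges_per_field.foldl
      (fun s p => p.2.foldl (fun s r => PySem.Set.update s r) s)
      PySem.Set.empty
  let vals := PySem.List.sorted seen (fun x => x) false
  tickets.filter (fun t => t.all (fun v => pvContains vals v))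

-- ===== PRECONDITION & SPEC =====
def Spec_find_valid_tickets (tickets : List (List Int)) (allowed_ranges_per_field : List (String × List (List Int))) (out : List (List Int)) : Prop := out = find_valid_tickets_alt tickets allowed_ranges_per_field
instance (tickets : List (List Int)) (allowed_ranges_per_field : List (String × List (List Int))) (out : List (List Int)) : Decidable (Spec_find_valid_tickets tickets allowed_ranges_per_field out) := by unfold Spec_find_valid_tickets; infer_instance

-- ===== CLAIM (what is proved, stated in full; the proofs are below) =====
def Claim_equal_find_valid_tickets : Prop := ∀ (tickets : List (List Int)) (allowed_ranges_per_field : List (String × List (List Int))), Dom_find_valid_tickets tickets allowed_ranges_per_field → Spec_find_valid_tickets tickets allowed_ranges_per_field (find_valid_tickets tickets allowed_ranges_per_field)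

-- ===== LEMMAS AND PROOFS =====

-- Source B's hand-written while loop is exactly bisect_left's loop
theorem pvBsLoop_eq_bisectLeftLoop (vals : List Int) (v : Int) (fuel lo hi : Nat) :
    pvBsLoop vals v fuel lo hi = PySem.List.bisectLeftLoop vals v fuel lo hi := by
  induction fuel generalizing lo hi with
  | zero => simp [pvBsLoop, PySem.List.bisectLeftLoop]
  | succ fuel ih =>
    simp only [pvBsLoop, PySem.List.bisectLeftLoop, PySem.List.pyGet?_natCast]
    split_ifs
    · cases vals[(lo + hi) / 2]? with
      | none => rfl
      | some y => by_cases hy : y < v <;> simp [hy, ih]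
    · rfl

-- binary search decides membership in a (≤)-sorted list
theorem pvContains_iff_mem (vals : List Int) (v : Int)
    (hs : vals.Pairwise (· ≤ ·)) : pvContains vals v = true ↔ v ∈ vals := by
  have hloop : pvBsLoop vals v vals.length 0 vals.length = PySem.List.bisectLeft vals v := by
    rw [pvBsLoop_eq_bisectLeftLoop]; rfl
  obtain ⟨hle, hlt, hge⟩ := PySem.List.bisectLeft_spec vals v hs
  set r := PySem.List.bisectLeft vals v with hr
  unfold pvContains
  rw [hloop]
  show (decide (r < vals.length) && (vals.getD r 0 == v)) = true ↔ v ∈ vals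
  constructor
  · intro h
    simp only [Bool.and_eq_true, decide_eq_true_eq, beq_iff_eq] at h
    obtain ⟨h1, h2⟩ := h
    rw [List.getD_eq_getElem vals 0 h1] at h2
    exact h2 ▸ List.getElem_mem h1
  · intro hv
    obtain ⟨j, hj, hvj⟩ := List.mem_iff_getElem.mp hv
    have hrj : r ≤ j := by
      by_contra hlt'
      exact absurd (hvj ▸ hlt j hj (Nat.lt_of_not_le hlt')) (lt_irrefl v)
    have hrlen : r < vals.length := Nat.lt_of_le_of_lt hrj hj
    have h1 : v ≤ vals[r] := hge r hrlen (le_refl r)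
    have h2 : vals[r] ≤ vals[j] := by
      rcases Nat.eq_or_lt_of_le hrj with h | h
      · simp [h]
      · exact List.pairwise_iff_getElem.mp hs r j hrlen hj h
    have : vals[r] = v := le_antisymm (hvj ▸ h2) h1
    simp [hrlen, this]

-- membership in the inner fold (set.update over the ranges of one field)
theorem mem_inner_fold (rs : List (List Int)) (s : PySem.Set Int) (v : Int) :
    v ∈ rs.foldl (fun s r => PySem.Set.update s r) s ↔ v ∈ s ∨ ∃ r ∈ rs, v ∈ r := by
  induction rs generalizing s with
  | nil => simp
  | cons r rs ih =>
    simp [List.foldl_cons, ih, PySem.Set.mem_update]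
    tauto

-- membership in the full fold over all fields
theorem mem_outer_fold (l : List (String × List (List Int))) (s : PySem.Set Int) (v : Int) :
    v ∈ l.foldl (fun s p => p.2.foldl (fun s r => PySem.Set.update s r) s) s ↔
      v ∈ s ∨ ∃ p ∈ l, ∃ r ∈ p.2, v ∈ r := by
  induction l generalizing s with
  | nil => simp
  | cons p l ih =>
    simp only [List.foldl_cons, ih, mem_inner_fold, List.mem_cons]
    constructor
    · rintro ((h | h) | ⟨q, hq, h⟩)
      · exact Or.inl h
      · exact Or.inr ⟨p, Or.inl rfl, h⟩
      · exact Or.inr ⟨q, Or.inr hq, h⟩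
    · rintro (h | ⟨q, (rfl | hq), h⟩)
      · exact Or.inl (Or.inl h)
      · exact Or.inl (Or.inr h)
      · exact Or.inr ⟨q, hq, h⟩

-- ===== VERDICT (by name: the statement is the Claim_ definition above) =====
theorem find_valid_tickets_spec : Claim_equal_find_valid_tickets := by
  intro tickets arpf _
  unfold Spec_find_valid_tickets find_valid_tickets find_valid_tickets_alt
  refine List.filter_congr ?_
  intro t _
  refine congrArg (fun f => t.all f) ?_
  funext v
  set seen := arpf.foldl (fun s p => p.2.foldl (fun s r => PySem.Set.update s r) s) PySem.Set.empty with hseen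
  set vals := PySem.List.sorted (α := Int) seen (fun x => x) false with hvals
  have hs : vals.Pairwise (· ≤ ·) := PySem.List.sorted_pairwise seen (fun x => x)
  have hmem : v ∈ vals ↔ ∃ p ∈ arpf, ∃ r ∈ p.2, v ∈ r := by
    rw [hvals, PySem.List.mem_sorted, hseen, mem_outer_fold]
    simp [PySem.Set.empty]
  have hA : (((arpf.map Prod.snd).flatMap id).any (fun r => r.contains v)) = true ↔
      ∃ p ∈ arpf, ∃ r ∈ p.2, v ∈ r := by
    simp [List.any_eq_true]
  apply Bool.eq_iff_iff.mpr
  rw [hA, pvContains_iff_mem vals v hs, hmem]
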